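-- pv_equiv track=rewrite | github.com/lherron2/seed-from-alignment | src/lib/sample_cacofold_structures.py | aln_to_seq_map
-- ===== SOURCE A (Python) =====
-- GAP_CHARS = set("-._~")
--
-- def aln_to_seq_map(aligned_seq: str) -> tuple[dict[int, int], int]:
--     """
--     Build a map alignment_index -> sequence_index (ungapped)
--     for one sequence. Returns (aln2seq, L), where:
--       - aln2seq[i] = seq_index or -1 if gap
--       - L = length of ungapped sequence
--     """
--     aln2seq: dict[int, int] = {}
--     pos = 0
--     for i, ch in enumerate(aligned_seq):
--         if ch in GAP_CHARS:
--             aln2seq[i] = -1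
--         else:
--             aln2seq[i] = pos
--             pos += 1
--     return aln2seq, pos
-- ===== SOURCE B (Python) =====
-- GAP_CHARS = set("-._~")
--
-- def aln_to_seq_map(aligned_seq: str) -> tuple[dict[int, int], int]:
--     """Same result as A, built without a running counter: collect the non-gap
--     alignment indices, index them once, then fill the map by lookup."""
--     nongap = [i for i, ch in enumerate(aligned_seq) if ch not in GAP_CHARS]
--     seq_of = {aln_i: seq_i for seq_i, aln_i in enumerate(nongap)}
--     aln2seq = {i: seq_of.get(i, -1) for i in range(len(aligned_seq))}
--     return aln2seq, len(nongap)
-- ===== Notes on version B (the rewrite author's own statement) =====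
-- stated objective: alternative
-- what changed: A's single stateful pass with a running ungapped-position counter is replaced by three counter-free passes: collect the non-gap alignment indices, build an index dictionary from that list by enumeration, then fill the result map over range(len) by dictionary lookup with -1 as default.
import Mathlib
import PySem

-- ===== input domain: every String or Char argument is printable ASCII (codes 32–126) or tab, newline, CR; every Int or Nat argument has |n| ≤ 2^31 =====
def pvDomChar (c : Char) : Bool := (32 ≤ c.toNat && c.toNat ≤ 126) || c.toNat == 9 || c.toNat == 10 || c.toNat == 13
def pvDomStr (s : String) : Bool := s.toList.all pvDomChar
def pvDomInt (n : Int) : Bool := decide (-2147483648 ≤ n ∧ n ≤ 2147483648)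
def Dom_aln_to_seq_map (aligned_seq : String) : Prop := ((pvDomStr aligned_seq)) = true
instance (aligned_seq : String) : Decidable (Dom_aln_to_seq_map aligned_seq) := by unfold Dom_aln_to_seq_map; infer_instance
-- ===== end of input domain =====

-- B replaces A's running ungapped-position counter by three counter-free passes
-- (collect non-gap indices, enumerate them into a lookup dict, fill the map by lookup);
-- proved to return exactly A's value on every input (objective: alternative).


-- ===== PORT A =====
-- GAP_CHARS = set("-._~")
def pvGapChars : PySem.Set Char := PySem.Set.ofList "-._~".toList

def aln_to_seq_map (aligned_seq : String) : (List (Int × Int)) × Int :=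
  let st := (PySem.List.enumerate aligned_seq.toList 0).foldl
    (fun (st : PySem.Dict Int Int × Int) q =>
      if pvGapChars.contains q.2 then (st.1.insert q.1 (-1), st.2)
      else (st.1.insert q.1 st.2, st.2 + 1))
    (PySem.Dict.empty, 0)
  (st.1.items, st.2)

-- ===== PORT B =====
def aln_to_seq_map_alt (aligned_seq : String) : (List (Int × Int)) × Int :=
  let l := aligned_seq.toList
  let nongap := ((PySem.List.enumerate l 0).filter (fun q => !pvGapChars.contains q.2)).map (fun q => q.1)
  let seq_of := (PySem.List.enumerate nongap 0).foldl
      (fun (d : PySem.Dict Int Int) q => d.insert q.2 q.1) PySem.Dict.empty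
  let aln2seq := (PySem.List.pyRange 0 (l.length : Int) 1).foldl
      (fun (d : PySem.Dict Int Int) i => d.insert i (seq_of.getD i (-1))) PySem.Dict.empty
  (aln2seq.items, (nongap.length : Int))

-- ===== PRECONDITION & SPEC =====
def Spec_aln_to_seq_map (aligned_seq : String) (out : (List (Int × Int)) × Int) : Prop := out = aln_to_seq_map_alt aligned_seq
instance (aligned_seq : String) (out : (List (Int × Int)) × Int) : Decidable (Spec_aln_to_seq_map aligned_seq out) := by unfold Spec_aln_to_seq_map; infer_instance

-- ===== CLAIM (what is proved, stated in full; the proofs are below) =====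
def Claim_equal_aln_to_seq_map : Prop := ∀ (aligned_seq : String), Dom_aln_to_seq_map aligned_seq → Spec_aln_to_seq_map aligned_seq (aln_to_seq_map aligned_seq)

-- ===== LEMMAS AND PROOFS =====

-- list(enumerate) splits over append
theorem pv_enumerate_append {α : Type} (xs ys : List α) (s : Int) :
    PySem.List.enumerate (xs ++ ys) s
      = PySem.List.enumerate xs s ++ PySem.List.enumerate ys (s + xs.length) := by
  induction xs generalizing s with
  | nil => simp [PySem.List.enumerate]
  | cons x xs ih =>
      simp [PySem.List.enumerate_cons, ih (s + 1)]
      ring_nf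

-- every element of enumerate is (s+k, xs[k])
theorem pv_mem_enumerate {α : Type} (xs : List α) (s : Int) (q : Int × α)
    (hq : q ∈ PySem.List.enumerate xs s) :
    ∃ k : Nat, ∃ h : k < xs.length, q = (s + k, xs[k]) := by
  induction xs generalizing s with
  | nil => simp [PySem.List.enumerate] at hq
  | cons x xs ih =>
      rw [PySem.List.enumerate_cons] at hq
      rcases List.mem_cons.mp hq with h | h
      · exact ⟨0, by simp, by simpa using h⟩
      · obtain ⟨k, hk, hq'⟩ := ih (s + 1) h
        exact ⟨k + 1, by simp [List.length_cons]; omega, by simp [hq']; ring⟩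

-- converse: each (s+k, xs[k]) is in enumerate
theorem pv_enumerate_mem {α : Type} (xs : List α) (s : Int) (k : Nat) (h : k < xs.length) :
    ((s + (k : Int)), xs[k]) ∈ PySem.List.enumerate xs s := by
  induction xs generalizing s k with
  | nil => simp at h
  | cons x xs ih =>
      rw [PySem.List.enumerate_cons]
      cases k with
      | zero => simp
      | succ k =>
          refine List.mem_cons_of_mem _ ?_
          have h' : k < xs.length := by simpa using h
          have := ih (s + 1) k h'
          have harith : (s + 1 + (k : Int)) = s + ((k : Nat) + 1 : Nat) := by push_cast; ring
          simpa [harith] using this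
-- first components of enumerate lie at or above the start
theorem pv_fst_enumerate_ge {α : Type} (xs : List α) (s : Int) (q : Int × α)
    (hq : q ∈ PySem.List.enumerate xs s) : s ≤ q.1 := by
  obtain ⟨k, hk, rfl⟩ := pv_mem_enumerate xs s q hq
  simp

-- filtering enumerate by a predicate on the character counts the characters
theorem pv_length_filter_enumerate {α : Type} (xs : List α) (s : Int) (Q : α → Bool) :
    ((PySem.List.enumerate xs s).filter (fun q => Q q.2)).length = xs.countP Q := by
  induction xs generalizing s with
  | nil => simp [PySem.List.enumerate]
  | cons x xs ih =>
      rw [PySem.List.enumerate_cons]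
      by_cases h : Q x <;> simp [h, ih (s + 1)]

-- the non-gap index list has no duplicates
theorem pv_nodup_nongap (l : List Char) :
    (((PySem.List.enumerate l 0).filter (fun q => !pvGapChars.contains q.2)).map (fun q => q.1)).Nodup := by
  have hsub : (((PySem.List.enumerate l 0).filter (fun q => !pvGapChars.contains q.2)).map (fun q => q.1)).Sublist
      ((PySem.List.enumerate l 0).map (fun q => q.1)) :=
    List.filter_sublist.map _
  have : ((PySem.List.enumerate l 0).map (fun q => q.1)).Nodup := by
    rw [PySem.List.map_fst_enumerate]
    exact PySem.List.nodup_pyRange_one _ _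
  exact this.sublist hsub

-- A's loop, characterized with arbitrary start, dict and counter
theorem pv_A_loop (l : List Char) (s : Int) (d : PySem.Dict Int Int) (p : Int)
    (hf : ∀ q ∈ PySem.List.enumerate l s, d.contains q.1 = false) :
    ((PySem.List.enumerate l s).foldl
      (fun (st : PySem.Dict Int Int × Int) q =>
        if pvGapChars.contains q.2 then (st.1.insert q.1 (-1), st.2)
        else (st.1.insert q.1 st.2, st.2 + 1)) (d, p))
    = (⟨d.items ++ (List.range l.length).map
          (fun (k : Nat) => ((s + (k : Int)),
            if pvGapChars.contains (l.getD k ' ') then (-1 : Int)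
            else p + ((l.take k).countP (fun c => !pvGapChars.contains c) : Int)))⟩,
       p + (l.countP (fun c => !pvGapChars.contains c) : Int)) := by
  induction l generalizing s d p with
  | nil =>
      simp [PySem.List.enumerate]
  | cons c t ih =>
      rw [PySem.List.enumerate_cons]
      simp only [List.foldl_cons]
      have hhead : d.contains s = false := by
        have := hf (s, c) (by rw [PySem.List.enumerate_cons]; exact List.mem_cons_self)
        simpa using this
      have hf' : ∀ v : Int, ∀ q ∈ PySem.List.enumerate t (s + 1), (d.insert s v).contains q.1 = false := by
        intro v q hq
        have h1 : d.contains q.1 = false :=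
          hf q (by rw [PySem.List.enumerate_cons]; exact List.mem_cons_of_mem _ hq)
        have h2 : s + 1 ≤ q.1 := pv_fst_enumerate_ge t (s + 1) q hq
        rw [PySem.Dict.contains_insert]
        simp [h1]
        omega
      by_cases hc : pvGapChars.contains c
      all_goals first
        | (have hm : c ∈ pvGapChars := by simpa using hc)
        | (have hm : c ∉ pvGapChars := by simpa using hc)
      · simp only [hc, if_true]
        rw [ih (s + 1) (d.insert s (-1)) p (hf' (-1))]
        refine Prod.ext ?_ ?_
        · apply PySem.Dict.ext
          simp only
          rw [PySem.Dict.items_insert_of_not_contains d _ hhead]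
          simp only [List.length_cons]
          rw [List.range_succ_eq_map, List.map_cons, List.map_map, List.append_assoc]
          simp only [List.getD_cons_zero, List.take_zero, hc, if_true,
            Nat.cast_zero, add_zero, List.singleton_append]
          congr 2
          refine List.map_congr_left ?_
          intro k hk
          refine Prod.ext ?_ ?_
          · simp only [Function.comp]; push_cast; ring
          · simp [Function.comp, hm, List.take_succ_cons]
        · simp [hm]
      · simp only [hc, Bool.false_eq_true, if_false]
        rw [ih (s + 1) (d.insert s p) (p + 1) (hf' p)]
        refine Prod.ext ?_ ?_
        · apply PySem.Dict.ext
          simp only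
          rw [PySem.Dict.items_insert_of_not_contains d _ hhead]
          simp only [List.length_cons]
          rw [List.range_succ_eq_map, List.map_cons, List.map_map, List.append_assoc]
          simp only [List.getD_cons_zero, List.take_zero,
            Nat.cast_zero, add_zero, List.singleton_append]
          congr 2
          · simp [hm]
          refine List.map_congr_left ?_
          intro k hk
          refine Prod.ext ?_ ?_
          · simp only [Function.comp]; push_cast; ring
          · simp only [Function.comp, List.getD_cons_succ, List.take_succ_cons,
              List.countP_cons]
            split
            · rfl
            · simp [hm]
              ring
        · simp [hm]
          ring

-- B's lookup dict agrees pointwise with A's per-index value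
theorem pv_pointwise (l : List Char) (k : Nat) (hk : k < l.length) :
    (((PySem.List.enumerate (((PySem.List.enumerate l 0).filter (fun q => !pvGapChars.contains q.2)).map (fun q => q.1)) 0).foldl
        (fun (d : PySem.Dict Int Int) q => d.insert q.2 q.1) PySem.Dict.empty).getD (k : Int) (-1))
      = if pvGapChars.contains (l.getD k ' ') then (-1 : Int)
        else ((l.take k).countP (fun c => !pvGapChars.contains c) : Int) := by
  have hnd : (((PySem.List.enumerate l 0).filter (fun q => !pvGapChars.contains q.2)).map (fun q => q.1)).Nodup :=
    pv_nodup_nongap l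
  have hitems : ((PySem.List.enumerate (((PySem.List.enumerate l 0).filter (fun q => !pvGapChars.contains q.2)).map (fun q => q.1)) 0).foldl
        (fun (d : PySem.Dict Int Int) q => d.insert q.2 q.1) PySem.Dict.empty).items
      = (PySem.List.enumerate (((PySem.List.enumerate l 0).filter (fun q => !pvGapChars.contains q.2)).map (fun q => q.1)) 0).map
          (fun q => (q.2, q.1)) := by
    have h := PySem.Dict.items_foldl_insert_fresh
      (l := PySem.List.enumerate (((PySem.List.enumerate l 0).filter (fun q => !pvGapChars.contains q.2)).map (fun q => q.1)) 0)
      (k := fun q => q.2) (v := fun q => q.1) (d := PySem.Dict.empty)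
      (by intro a _; exact PySem.Dict.contains_empty _)
      (by rw [PySem.List.map_snd_enumerate]; exact hnd)
    simpa using h
  have hkeys : ((PySem.List.enumerate (((PySem.List.enumerate l 0).filter (fun q => !pvGapChars.contains q.2)).map (fun q => q.1)) 0).foldl
        (fun (d : PySem.Dict Int Int) q => d.insert q.2 q.1) PySem.Dict.empty).keys
      = ((PySem.List.enumerate l 0).filter (fun q => !pvGapChars.contains q.2)).map (fun q => q.1) := by
    simp only [PySem.Dict.keys, hitems, List.map_map]
    have : ((fun (p : Int × Int) => p.1) ∘ fun (q : Int × Int) => (q.2, q.1)) = fun (q : Int × Int) => q.2 := rfl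
    rw [this, PySem.List.map_snd_enumerate]
  by_cases hg : pvGapChars.contains (l.getD k ' ')
  · rw [if_pos hg]
    apply PySem.Dict.getD_of_not_contains
    rw [← Bool.not_eq_true, PySem.Dict.contains_iff_mem_keys, hkeys]
    intro hmem
    obtain ⟨q, hqf, hq1⟩ := List.mem_map.mp hmem
    obtain ⟨hqe, hqg⟩ := List.mem_filter.mp hqf
    obtain ⟨k', hk', rfl⟩ := pv_mem_enumerate l 0 q hqe
    have : k' = k := by
      have := hq1
      simp at this
      omega
    subst this
    rw [List.getD_eq_getElem l ' ' hk'] at hg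
    simp only [hg] at hqg
    simp at hqg
  · rw [if_neg hg]
    -- the index k is the (countP (take k))-th element of the non-gap list
    have hkk : k < l.length := hk
    have hsplit : l = l.take k ++ (l[k] :: l.drop (k + 1)) := by
      conv_lhs => rw [← List.take_append_drop k l]
      rw [List.drop_eq_getElem_cons hkk]
    have hlen : (l.take k).length = k := by simp [List.length_take]; omega
    -- decompose the non-gap list
    have hng : ((PySem.List.enumerate l 0).filter (fun q => !pvGapChars.contains q.2)).map (fun q => q.1)
        = (((PySem.List.enumerate (l.take k) 0).filter (fun q => !pvGapChars.contains q.2)).map (fun q => q.1))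
          ++ ((k : Int) :: ((PySem.List.enumerate (l.drop (k+1)) ((k : Int) + 1)).filter (fun q => !pvGapChars.contains q.2)).map (fun q => q.1)) := by
      conv_lhs => rw [hsplit]
      rw [pv_enumerate_append, List.filter_append, List.map_append, hlen]
      congr 1
      rw [PySem.List.enumerate_cons]
      have hgb : (!pvGapChars.contains l[k]) = true := by
        rw [List.getD_eq_getElem l ' ' hkk] at hg
        simpa using hg
      rw [List.filter_cons_of_pos (by simpa using hgb)]
      simp
    have hlenA : (((PySem.List.enumerate (l.take k) 0).filter (fun q => !pvGapChars.contains q.2)).map (fun q => q.1)).length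
        = (l.take k).countP (fun c => !pvGapChars.contains c) := by
      rw [List.length_map]
      exact pv_length_filter_enumerate (l.take k) 0 (fun c => !pvGapChars.contains c)
    have hjlt : (l.take k).countP (fun c => !pvGapChars.contains c)
        < (((PySem.List.enumerate l 0).filter (fun q => !pvGapChars.contains q.2)).map (fun q => q.1)).length := by
      rw [hng, List.length_append, hlenA]
      simp only [List.length_cons]
      omega
    have hgetj : (((PySem.List.enumerate l 0).filter (fun q => !pvGapChars.contains q.2)).map (fun q => q.1))[(l.take k).countP (fun c => !pvGapChars.contains c)]'hjlt
        = (k : Int) := by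
      rw [List.getElem_of_eq hng]
      rw [List.getElem_append_right (le_of_eq hlenA)]
      have hflen : (List.filter (fun q => !pvGapChars.contains q.2) (PySem.List.enumerate (List.take k l) 0)).length
          = (l.take k).countP (fun c => !pvGapChars.contains c) :=
        pv_length_filter_enumerate (l.take k) 0 (fun c => !pvGapChars.contains c)
      have h0 : List.countP (fun c => !pvGapChars.contains c) (List.take k l)
          - (List.map (fun (q : Int × Char) => q.1)
              (List.filter (fun q => !pvGapChars.contains q.2) (PySem.List.enumerate (List.take k l) 0))).length = 0 := by
        rw [List.length_map, hflen]
        omega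
      rw [getElem_congr rfl h0 (by have h' := hflen; simp at h' ⊢; omega)]
      rfl
    have hmemE := pv_enumerate_mem
      (((PySem.List.enumerate l 0).filter (fun q => !pvGapChars.contains q.2)).map (fun q => q.1)) 0
      ((l.take k).countP (fun c => !pvGapChars.contains c)) hjlt
    rw [hgetj] at hmemE
    have hpair : ((k : Int), ((l.take k).countP (fun c => !pvGapChars.contains c) : Int))
        ∈ ((PySem.List.enumerate (((PySem.List.enumerate l 0).filter (fun q => !pvGapChars.contains q.2)).map (fun q => q.1)) 0).foldl
            (fun (d : PySem.Dict Int Int) q => d.insert q.2 q.1) PySem.Dict.empty).items := by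
      rw [hitems]
      exact List.mem_map.mpr ⟨(0 + ((l.take k).countP (fun c => !pvGapChars.contains c) : Int), (k : Int)), hmemE, by simp⟩
    have hknd : ((PySem.List.enumerate (((PySem.List.enumerate l 0).filter (fun q => !pvGapChars.contains q.2)).map (fun q => q.1)) 0).foldl
        (fun (d : PySem.Dict Int Int) q => d.insert q.2 q.1) PySem.Dict.empty).keys.Nodup := by
      rw [hkeys]; exact hnd
    exact PySem.Dict.getD_of_mem_items _ hpair hknd (-1)

-- ===== VERDICT (by name: the statement is the Claim_ definition above) =====
theorem aln_to_seq_map_spec : Claim_equal_aln_to_seq_map := by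
  intro s _
  unfold Spec_aln_to_seq_map aln_to_seq_map aln_to_seq_map_alt
  dsimp only
  rw [pv_A_loop s.toList 0 PySem.Dict.empty 0 (fun q _ => PySem.Dict.contains_empty _)]
  have hB := PySem.Dict.items_foldl_insert_fresh
    (l := PySem.List.pyRange 0 (s.toList.length : Int) 1)
    (k := fun (i : Int) => i)
    (v := fun i => (((PySem.List.enumerate (((PySem.List.enumerate s.toList 0).filter (fun q => !pvGapChars.contains q.2)).map (fun q => q.1)) 0).foldl
        (fun (d : PySem.Dict Int Int) q => d.insert q.2 q.1) PySem.Dict.empty).getD i (-1)))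
    (d := PySem.Dict.empty)
    (fun a _ => PySem.Dict.contains_empty _)
    (by simpa [List.map_id] using PySem.List.nodup_pyRange_one 0 (s.toList.length : Int))
  refine Prod.ext ?_ ?_
  · dsimp only
    rw [hB]
    rw [PySem.List.pyRange_zero_nat, List.map_map]
    simp only [show (PySem.Dict.empty : PySem.Dict Int Int).items = [] from rfl, List.nil_append]
    refine List.map_congr_left ?_
    intro k hk
    have hklt : k < s.toList.length := List.mem_range.mp hk
    refine Prod.ext ?_ ?_
    · simp
    · simp only [Function.comp]
      rw [pv_pointwise s.toList k hklt]
      simp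
  · dsimp only
    rw [List.length_map,
      pv_length_filter_enumerate s.toList 0 (fun c => !pvGapChars.contains c)]
    simp
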